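-- pv_equiv track=rewrite | github.com/pypi-data/pypi-mirror-380 | packages/asodesigner/asodesigner-0.1.1-py3-none-any.whl/asodesigner/may_fixing_missing.py | find_and_mutate
-- ===== SOURCE A (Python) =====
-- def find_and_mutate(sequences, subseq, mutate_pos_in_subseq=0):
--     mutated_results  = []
--     for seq_idx, seq in enumerate(sequences):
--         new_seq = str(seq)  # start with original
--         i = 0
--         mutated = False
--         while i <= len(new_seq) - len(subseq):
--             if new_seq[i:i+len(subseq)] == subseq:
--                 target_index = i + mutate_pos_in_subseq
--                 if target_index < len(new_seq):
--                     mutated_base = 'C'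
--                     new_seq = new_seq[:target_index] + mutated_base + new_seq[target_index+1:]
--                     mutated = True
--                 i += len(subseq)
--             else:
--                 i += 1
--         if mutated:
--             mutated_results.append((seq_idx, new_seq))
--
--     return mutated_results
-- ===== SOURCE B (Python) =====
-- def find_and_mutate(sequences, subseq, mutate_pos_in_subseq=0):
--     m = len(subseq)
--     # the mutated base lies INSIDE the matched subsequence (as the parameter's
--     # name and its default 0 say); any other position mutates nothing
--     in_window = 0 <= mutate_pos_in_subseq < m
--     results = []
--     for seq_idx, seq in enumerate(sequences):
--         n = len(seq)
--         muts = set()  # positions mutated to 'C' (overlay; the string is never rebuilt)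
--         i = 0
--         while i <= n - m:
--             if all(('C' if i + k in muts else seq[i + k]) == subseq[k] for k in range(m)):
--                 if in_window:
--                     muts.add(i + mutate_pos_in_subseq)
--                 i += m
--             else:
--                 i += 1
--         if muts:
--             results.append((seq_idx,
--                             ''.join('C' if p in muts else c for p, c in enumerate(seq))))
--     return results
-- ===== Notes on version B (the rewrite author's own statement) =====
-- stated objective: alternative
-- what changed: B never rebuilds the string: it scans the immutable original once per sequence with an overlay set of mutated positions (the window compare reads 'C' at overlaid positions) and materialises the result string once at the end; the mutation index is treated as a position inside the matched subsequence, so no bounds arithmetic on the live string is needed.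
-- intended difference: On inputs where mutate_pos_in_subseq lies outside [0, len(subseq)) and subseq occurs early enough that A reaches a mutation index below len(seq), A writes 'C' OUTSIDE the matched occurrence -- past its end for mutate_pos_in_subseq >= len(subseq), or wrapping a negative index Python-style (even doubling the string when j+pos = -1, e.g. A(['AB'],'A',-1) = [(0,'ACAB')]) -- and reports such sequences as mutated; … — e.g. on find_and_mutate(["AB"], "A", -1): A returns [(0, "ACAB")], B returns []
import Mathlib
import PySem

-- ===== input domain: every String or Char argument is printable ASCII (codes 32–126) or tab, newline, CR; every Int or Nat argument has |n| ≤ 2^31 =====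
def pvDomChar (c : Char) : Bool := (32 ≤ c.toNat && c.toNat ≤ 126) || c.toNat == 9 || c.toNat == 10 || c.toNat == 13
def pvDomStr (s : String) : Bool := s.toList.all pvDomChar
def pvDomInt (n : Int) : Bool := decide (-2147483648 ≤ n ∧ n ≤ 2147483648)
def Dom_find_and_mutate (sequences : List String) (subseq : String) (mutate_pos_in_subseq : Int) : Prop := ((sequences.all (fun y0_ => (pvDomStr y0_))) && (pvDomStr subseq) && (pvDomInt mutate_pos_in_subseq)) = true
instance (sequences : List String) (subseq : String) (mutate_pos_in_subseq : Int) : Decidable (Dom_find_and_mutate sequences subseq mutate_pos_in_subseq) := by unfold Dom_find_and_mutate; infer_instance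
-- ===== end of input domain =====

-- B never rebuilds the string: one scan of the immutable original per sequence with an overlay set
-- of mutated positions, materialised once at the end; B mutates only a position INSIDE the matched
-- subsequence (A writes at j+pos anywhere, wrapping negative indices — stated as D_ below).


-- ===== PORT A =====
-- A's while loop: advance position by position over the LIVE string, slice-compare at each index,
-- rebuild the string by slicing on a match.  Fuel makes the recursion total; for subseq ≠ "" the
-- loop performs at most 2*(len+|pos|)+8 iterations (the string can only grow while i+pos < 0), so
-- the fuel is never exhausted on inputs Pre_ admits.
def pvA_loop (sub : List Char) (pos : Int) : Nat → List Char → Nat → Bool → List Char × Bool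
  | 0, s, _, mtd => (s, mtd)
  | fuel+1, s, i, mtd =>
    if (i : Int) ≤ (s.length : Int) - (sub.length : Int) then
      if PySem.List.slice s (some (i : Int)) (some ((i : Int) + (sub.length : Int))) = sub then
        let t : Int := (i : Int) + pos
        if t < (s.length : Int) then
          pvA_loop sub pos fuel
            (PySem.List.slice s none (some t) ++ ['C'] ++ PySem.List.slice s (some (t + 1)) none)
            (i + sub.length) true
        else pvA_loop sub pos fuel s (i + sub.length) mtd
      else pvA_loop sub pos fuel s (i + 1) mtd
    else (s, mtd)

def find_and_mutate (sequences : List String) (subseq : String) (mutate_pos_in_subseq : Int) : List (Int × String) :=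
  (PySem.List.enumerate sequences 0).foldl
    (fun acc p =>
      let r := pvA_loop subseq.toList mutate_pos_in_subseq
        (2 * (p.2.toList.length + mutate_pos_in_subseq.natAbs) + 8) p.2.toList 0 false
      if r.2 = true then acc ++ [(p.1, String.ofList r.1)] else acc)
    []

-- ===== PORT B =====
-- B's overlay character at position p: 'C' if p was mutated, else the ORIGINAL character.
def pvB_at (s : List Char) (muts : PySem.Set Int) (p : Nat) : Char :=
  if PySem.Set.contains muts ((p : Nat) : Int) then 'C' else s.getD p ' '

-- B's while loop over the immutable original: window-compare through the overlay; when the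
-- mutation position lies inside the subseq window (inwin), record it in the set.  The string
-- never changes, so fuel n+2 suffices (i grows each iteration).
def pvB_loop (s sub : List Char) (pos : Int) (inwin : Bool) :
    Nat → PySem.Set Int → Nat → PySem.Set Int
  | 0, muts, _ => muts
  | fuel+1, muts, i =>
    if (i : Int) ≤ (s.length : Int) - (sub.length : Int) then
      if (List.range sub.length).all (fun k => pvB_at s muts (i + k) == sub.getD k ' ') then
        let muts' := if inwin = true then PySem.Set.add muts ((i : Int) + pos) else muts
        pvB_loop s sub pos inwin fuel muts' (i + sub.length)
      else pvB_loop s sub pos inwin fuel muts (i + 1)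
    else muts

def find_and_mutate_alt (sequences : List String) (subseq : String) (mutate_pos_in_subseq : Int) : List (Int × String) :=
  let inwin := decide (0 ≤ mutate_pos_in_subseq ∧
    mutate_pos_in_subseq < (subseq.toList.length : Int))
  (PySem.List.enumerate sequences 0).foldl
    (fun acc p =>
      let s := p.2.toList
      let muts := pvB_loop s subseq.toList mutate_pos_in_subseq inwin
        (s.length + 2) PySem.Set.empty 0
      if muts ≠ [] then
        acc ++ [(p.1, String.ofList ((PySem.List.enumerate s 0).map
          (fun pc => if PySem.Set.contains muts pc.1 then 'C' else pc.2)))]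
      else acc)
    []

-- ===== PRECONDITION & SPEC =====
-- Pre_ excludes only subseq = "", on which the Python A's while loop never advances (i += 0) and diverges.
def Pre_find_and_mutate (sequences : List String) (subseq : String) (mutate_pos_in_subseq : Int) : Prop :=
  subseq.toList ≠ []
instance (sequences : List String) (subseq : String) (mutate_pos_in_subseq : Int) : Decidable (Pre_find_and_mutate sequences subseq mutate_pos_in_subseq) := by unfold Pre_find_and_mutate; infer_instance

def pvWitness_find_and_mutate : List String × String × Int := (["AB"], "A", 0)

-- On inputs where mutate_pos_in_subseq lies outside [0, len(subseq)) and subseq occurs early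
-- enough that A reaches a mutation index below len(seq), A writes 'C' OUTSIDE the matched
-- occurrence — past its end for pos ≥ len(subseq), or wrapping a negative index Python-style
-- (even doubling the string at j+pos = -1) — and reports such sequences as mutated; B treats
-- mutate_pos_in_subseq as a position inside the matched subsequence (as its name and default 0
-- say) and leaves them unmutated — the intended behaviour for mutating a matched base.
def D_find_and_mutate (sequences : List String) (subseq : String) (mutate_pos_in_subseq : Int) : Prop :=
  (mutate_pos_in_subseq < 0 ∨ (subseq.toList.length : Int) ≤ mutate_pos_in_subseq) ∧
    ∃ s ∈ sequences, subseq.toList <:+: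
      s.toList.take (s.toList.length + subseq.toList.length - 1 - mutate_pos_in_subseq.toNat)
instance (sequences : List String) (subseq : String) (mutate_pos_in_subseq : Int) : Decidable (D_find_and_mutate sequences subseq mutate_pos_in_subseq) := by unfold D_find_and_mutate; infer_instance

def Spec_find_and_mutate (sequences : List String) (subseq : String) (mutate_pos_in_subseq : Int) (out : List (Int × String)) : Prop := ¬ D_find_and_mutate sequences subseq mutate_pos_in_subseq → out = find_and_mutate_alt sequences subseq mutate_pos_in_subseq
instance (sequences : List String) (subseq : String) (mutate_pos_in_subseq : Int) (out : List (Int × String)) : Decidable (Spec_find_and_mutate sequences subseq mutate_pos_in_subseq out) := by unfold Spec_find_and_mutate; infer_instance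

def pvDiffWitness_find_and_mutate : List String × String × Int := (["AB"], "A", -1)
def pvDiffWitnessOut_find_and_mutate : (List (Int × String)) × (List (Int × String)) := ([(0, "ACAB")], [])

-- ===== CLAIM (what is proved, stated in full; the proofs are below) =====
def Claim_unchanged_find_and_mutate : Prop := ∀ (sequences : List String) (subseq : String) (mutate_pos_in_subseq : Int), Dom_find_and_mutate sequences subseq mutate_pos_in_subseq → Pre_find_and_mutate sequences subseq mutate_pos_in_subseq → Spec_find_and_mutate sequences subseq mutate_pos_in_subseq (find_and_mutate sequences subseq mutate_pos_in_subseq)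
def Claim_changed_find_and_mutate : Prop := Dom_find_and_mutate (pvDiffWitness_find_and_mutate.1) (pvDiffWitness_find_and_mutate.2.1) (pvDiffWitness_find_and_mutate.2.2) ∧ Pre_find_and_mutate (pvDiffWitness_find_and_mutate.1) (pvDiffWitness_find_and_mutate.2.1) (pvDiffWitness_find_and_mutate.2.2) ∧ D_find_and_mutate (pvDiffWitness_find_and_mutate.1) (pvDiffWitness_find_and_mutate.2.1) (pvDiffWitness_find_and_mutate.2.2) ∧ find_and_mutate (pvDiffWitness_find_and_mutate.1) (pvDiffWitness_find_and_mutate.2.1) (pvDiffWitness_find_and_mutate.2.2) = pvDiffWitnessOut_find_and_mutate.1 ∧ find_and_mutate_alt (pvDiffWitness_find_and_mutate.1) (pvDiffWitness_find_and_mutate.2.1) (pvDiffWitness_find_and_mutate.2.2) = pvDiffWitnessOut_find_and_mutate.2 ∧ pvDiffWitnessOut_find_and_mutate.1 ≠ pvDiffWitnessOut_find_and_mutate.2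
def Claim_exact_find_and_mutate : Prop := ∀ (sequences : List String) (subseq : String) (mutate_pos_in_subseq : Int), Dom_find_and_mutate sequences subseq mutate_pos_in_subseq → Pre_find_and_mutate sequences subseq mutate_pos_in_subseq → D_find_and_mutate sequences subseq mutate_pos_in_subseq → find_and_mutate sequences subseq mutate_pos_in_subseq ≠ find_and_mutate_alt sequences subseq mutate_pos_in_subseq

-- ===== LEMMAS AND PROOFS =====

-- the overlay string: original with 'C' at every recorded position (definitionally B's join body)
def pvOv (s : List Char) (muts : PySem.Set Int) : List Char :=
  (PySem.List.enumerate s 0).map (fun pc => if PySem.Set.contains muts pc.1 then 'C' else pc.2)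

lemma pvOv_length (s : List Char) (muts : PySem.Set Int) : (pvOv s muts).length = s.length := by
  simp [pvOv, PySem.List.length_enumerate]

lemma pvOv_getElem (s : List Char) (muts : PySem.Set Int) (p : Nat) (hp : p < s.length) :
    (pvOv s muts)[p]'(by rw [pvOv_length]; exact hp) =
      if PySem.Set.contains muts ((p : Nat) : Int) then 'C' else s[p] := by
  simp [pvOv, PySem.List.getElem_enumerate]

lemma pvOv_empty (s : List Char) : pvOv s PySem.Set.empty = s := by
  simp [pvOv, PySem.Set.empty]

-- A's slice-compare at i is exactly "sub is a prefix of s.drop i"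
lemma pv_match_iff (sub s : List Char) (i : Nat) :
    (PySem.List.slice s (some (i : Int)) (some ((i : Int) + (sub.length : Int))) = sub) ↔
      sub <+: s.drop i := by
  rw [PySem.List.slice_natCast_add, List.prefix_iff_eq_take]
  exact eq_comm

-- prefix-at-i is a pointwise window condition
lemma pv_prefix_iff_forall (sub s : List Char) (i : Nat) (h : i + sub.length ≤ s.length) :
    sub <+: s.drop i ↔ ∀ k (hk : k < sub.length), s[i + k]'(by omega) = sub[k] := by
  rw [List.prefix_iff_eq_take]
  constructor
  · intro he k hk
    have h' := congrArg (fun l : List Char => l[k]?) he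
    simp only [List.getElem?_take, List.getElem?_drop, hk, if_pos] at h'
    rw [List.getElem?_eq_getElem hk, List.getElem?_eq_getElem (show i + k < s.length by omega)]
      at h'
    exact (Option.some.inj h').symm
  · intro hall
    apply List.ext_getElem
    · simp; omega
    · intro k hk1 hk2
      have hk : k < sub.length := hk1
      rw [List.getElem_take, List.getElem_drop]
      exact (hall k hk).symm

-- B's window test reads exactly the overlay characters
lemma pvB_at_eq (s : List Char) (muts : PySem.Set Int) (p : Nat) (hp : p < s.length) :
    pvB_at s muts p = (pvOv s muts)[p]'(by rw [pvOv_length]; exact hp) := by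
  rw [pvOv_getElem s muts p hp, pvB_at, List.getD_eq_getElem s ' ' hp]

lemma pv_test_iff (s sub : List Char) (muts : PySem.Set Int) (i : Nat)
    (h : i + sub.length ≤ s.length) :
    ((List.range sub.length).all (fun k => pvB_at s muts (i + k) == sub.getD k ' ') = true) ↔
      sub <+: (pvOv s muts).drop i := by
  rw [pv_prefix_iff_forall sub (pvOv s muts) i (by rw [pvOv_length]; exact h)]
  simp only [List.all_eq_true, List.mem_range, beq_iff_eq]
  constructor
  · intro hall k hk
    have := hall k hk
    rw [pvB_at_eq s muts (i + k) (by omega), List.getD_eq_getElem sub ' ' hk] at this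
    exact this
  · intro hall k hk
    rw [pvB_at_eq s muts (i + k) (by omega), List.getD_eq_getElem sub ' ' hk]
    exact hall k hk

-- an occurrence puts sub inside the length-(j+|sub|) prefix
lemma pv_match_in_prefix (s sub : List Char) (j K : Nat) (hK : j + sub.length ≤ K)
    (hm : sub <+: s.drop j) : sub <:+: s.take K := by
  obtain ⟨r, hr⟩ := hm
  have h1 : sub <:+: s.take (j + sub.length) := by
    have : s.take (j + sub.length) = s.take j ++ sub := by
      rw [List.take_add, ← hr, List.take_left]
    rw [this]
    exact ⟨s.take j, [], by simp⟩
  exact h1.trans (List.take_prefix_take_left hK).isInfix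

-- and conversely an occurrence inside a prefix is an occurrence
lemma pv_infix_iff_exists (sub s : List Char) : sub <:+: s ↔ ∃ j, sub <+: s.drop j := by
  rw [← PySem.Chars.isIn_iff_infix, ← PySem.Chars.exists_prefix_drop_iff_isIn]

-- adding an element leaves the set nonempty
lemma pv_add_ne_nil (muts : PySem.Set Int) (t : Int) : PySem.Set.add muts t ≠ [] := by
  intro h
  have : t ∈ PySem.Set.add muts t := (PySem.Set.mem_add muts t t).2 (Or.inr rfl)
  rw [h] at this
  simp at this

-- the rebuilt string s[:t] + 'C' + s[t+1:] for an in-range t is a point write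
lemma pv_rebuild_eq_set (s : List Char) (t : Int) (h0 : 0 ≤ t) (h1 : t < (s.length : Int)) :
    PySem.List.slice s none (some t) ++ ['C'] ++ PySem.List.slice s (some (t + 1)) none =
      s.set t.toNat 'C' := by
  rw [PySem.List.slice_to s h0, PySem.List.slice_from s (by omega : (0 : Int) ≤ t + 1)]
  rw [List.set_eq_take_append_cons_drop]
  have h2 : (t + 1).toNat = t.toNat + 1 := by omega
  have h3 : t.toNat < s.length := by omega
  simp [h2, h3]

-- recording one more position in the overlay is the same point write on the overlay
lemma pvOv_add (s : List Char) (muts : PySem.Set Int) (t : Int) (h0 : 0 ≤ t) :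
    pvOv s (PySem.Set.add muts t) = (pvOv s muts).set t.toNat 'C' := by
  apply List.ext_getElem
  · simp [pvOv_length]
  · intro k hk1 hk2
    rw [pvOv_length] at hk1
    rw [List.getElem_set, pvOv_getElem s _ k hk1, pvOv_getElem s muts k hk1]
    by_cases hkt : t.toNat = k
    · have he : ((k : Nat) : Int) = t := by omega
      have hc : PySem.Set.contains (PySem.Set.add muts t) ((k : Nat) : Int) = true := by
        rw [PySem.Set.contains_iff, he]
        exact (PySem.Set.mem_add muts t t).2 (Or.inr rfl)
      rw [hc]
      simp [hkt]
    · have hne : ((k : Nat) : Int) ≠ t := by omega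
      have hc : PySem.Set.contains (PySem.Set.add muts t) ((k : Nat) : Int) =
          PySem.Set.contains muts ((k : Nat) : Int) := by
        by_cases hmem : ((k : Nat) : Int) ∈ muts
        · rw [(PySem.Set.contains_iff ..).2 hmem,
            (PySem.Set.contains_iff ..).2 ((PySem.Set.mem_add muts t _).2 (Or.inl hmem))]
        · have h1' : PySem.Set.contains muts ((k : Nat) : Int) = false := by
            revert hmem
            rw [← PySem.Set.contains_iff]
            cases PySem.Set.contains muts ((k : Nat) : Int) <;> simp
          have h2' : PySem.Set.contains (PySem.Set.add muts t) ((k : Nat) : Int) = false := by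
            have : ¬ ((k : Nat) : Int) ∈ PySem.Set.add muts t := by
              rw [PySem.Set.mem_add]
              rintro (h | h)
              · exact hmem h
              · exact hne h
            revert this
            rw [← PySem.Set.contains_iff]
            cases PySem.Set.contains (PySem.Set.add muts t) ((k : Nat) : Int) <;> simp
          rw [h1', h2']
      rw [hc, if_neg hkt]

-- IN-WINDOW LOOP INVARIANT (0 ≤ pos < |sub|): A scanning the live (= overlay) string equals B
-- scanning the original with the mutation set; every mutation target is in range on both sides.
lemma pv_loop_eq_win (s sub : List Char) (hsub : sub ≠ []) (pos : Int)
    (hw0 : 0 ≤ pos) (hw1 : pos < (sub.length : Int)) :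
    ∀ (fa : Nat) (muts : PySem.Set Int) (i : Nat) (mtd : Bool) (fb : Nat),
      i ≤ s.length →
      (∀ q ∈ muts, 0 ≤ q) →
      (mtd = true ↔ muts ≠ []) →
      ((s.length : Int) + 2 ≤ (fa : Int) + i) →
      ((s.length : Int) + 2 ≤ (fb : Int) + i) →
      pvA_loop sub pos fa (pvOv s muts) i mtd =
        (pvOv s (pvB_loop s sub pos true fb muts i),
         decide (pvB_loop s sub pos true fb muts i ≠ [])) := by
  intro fa
  induction fa with
  | zero => intro muts i mtd fb hi _ _ hfa _; exfalso; omega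
  | succ fa ih =>
    intro muts i mtd fb hi hmuts hflag hfa hfb
    have hm : 0 < sub.length := List.length_pos_of_ne_nil hsub
    obtain ⟨fb', rfl⟩ : ∃ fb', fb = fb' + 1 := ⟨fb - 1, by omega⟩
    have hlen : ((pvOv s muts).length : Int) = (s.length : Int) := by rw [pvOv_length]
    by_cases hcond : (i : Int) ≤ (s.length : Int) - (sub.length : Int)
    · have hcondA : (i : Int) ≤ ((pvOv s muts).length : Int) - (sub.length : Int) := by
        rw [hlen]; exact hcond
      have hwin : i + sub.length ≤ s.length := by omega
      by_cases hmatch : sub <+: (pvOv s muts).drop i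
      · -- match in the live string: both sides mutate (the target is inside the window)
        have hAm : PySem.List.slice (pvOv s muts) (some (i : Int))
            (some ((i : Int) + (sub.length : Int))) = sub :=
          (pv_match_iff sub (pvOv s muts) i).2 hmatch
        have hBm : (List.range sub.length).all
            (fun k => pvB_at s muts (i + k) == sub.getD k ' ') = true :=
          (pv_test_iff s sub muts i hwin).2 hmatch
        have ht0 : 0 ≤ (i : Int) + pos := by omega
        have hg : (i : Int) + pos < (s.length : Int) := by omega
        have hA : pvA_loop sub pos (fa + 1) (pvOv s muts) i mtd =
            pvA_loop sub pos fa (pvOv s (PySem.Set.add muts ((i : Int) + pos)))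
              (i + sub.length) true := by
          simp only [pvA_loop]
          rw [if_pos hcondA, if_pos hAm, if_pos (by rw [hlen]; exact hg),
            pv_rebuild_eq_set (pvOv s muts) ((i : Int) + pos) ht0 (by rw [hlen]; exact hg),
            ← pvOv_add s muts ((i : Int) + pos) ht0]
        have hB : pvB_loop s sub pos true (fb' + 1) muts i =
            pvB_loop s sub pos true fb' (PySem.Set.add muts ((i : Int) + pos))
              (i + sub.length) := by
          simp only [pvB_loop]
          rw [if_pos hcond, if_pos hBm]
          simp
        rw [hA, hB]
        refine ih (PySem.Set.add muts ((i : Int) + pos)) (i + sub.length) true fb' (by omega)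
          ?_ ?_ ?_ ?_
        · intro q hq
          rcases (PySem.Set.mem_add ..).1 hq with h | h
          · exact hmuts q h
          · subst h; omega
        · simp [pv_add_ne_nil]
        · push_cast; push_cast at hfa; omega
        · push_cast; push_cast at hfb; omega
      · -- no match: both advance by one
        have hA : pvA_loop sub pos (fa + 1) (pvOv s muts) i mtd =
            pvA_loop sub pos fa (pvOv s muts) (i + 1) mtd := by
          simp only [pvA_loop]
          rw [if_pos hcondA, if_neg (fun hc => hmatch ((pv_match_iff ..).1 hc))]
        have hB : pvB_loop s sub pos true (fb' + 1) muts i =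
            pvB_loop s sub pos true fb' muts (i + 1) := by
          simp only [pvB_loop]
          rw [if_pos hcond,
            if_neg (fun hc => hmatch ((pv_test_iff s sub muts i hwin).1 hc))]
        rw [hA, hB]
        refine ih muts (i + 1) mtd fb' (by omega) hmuts hflag ?_ ?_
        · push_cast; push_cast at hfa; omega
        · push_cast; push_cast at hfb; omega
    · -- loop exit for both
      have hA : pvA_loop sub pos (fa + 1) (pvOv s muts) i mtd = (pvOv s muts, mtd) := by
        simp only [pvA_loop]
        rw [if_neg (by rw [hlen]; exact hcond)]
      have hB : pvB_loop s sub pos true (fb' + 1) muts i = muts := by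
        simp only [pvB_loop]
        rw [if_neg hcond]
      rw [hA, hB]
      have hm' : mtd = decide (muts ≠ []) := by
        cases mtd with
        | false =>
          have h : muts = [] := by
            by_contra h
            exact Bool.false_ne_true (hflag.2 h)
          simp [h]
        | true => simp [hflag.1 rfl]
      rw [hm']

-- OUT-OF-WINDOW, B side: the loop never records anything
lemma pvB_noop (s sub : List Char) (pos : Int) :
    ∀ (fb : Nat) (muts : PySem.Set Int) (i : Nat),
      pvB_loop s sub pos false fb muts i = muts := by
  intro fb
  induction fb with
  | zero => intro muts i; rfl
  | succ fb ih =>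
    intro muts i
    simp only [pvB_loop]
    by_cases hcond : (i : Int) ≤ (s.length : Int) - (sub.length : Int)
    · rw [if_pos hcond]
      by_cases hmm : ((List.range sub.length).all
          (fun k => pvB_at s muts (i + k) == sub.getD k ' ')) = true
      · rw [if_pos hmm, if_neg (by simp)]
        exact ih _ _
      · rw [if_neg hmm]
        exact ih _ _
    · rw [if_neg hcond]

-- OUT-OF-WINDOW, A side, no reachable target: the loop never mutates and returns the string as is
lemma pvA_noop (s sub : List Char) (pos : Int)
    (hno : ∀ j : Nat, sub <+: s.drop j → (s.length : Int) ≤ (j : Int) + pos) :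
    ∀ (fa : Nat) (i : Nat), pvA_loop sub pos fa s i false = (s, false) := by
  intro fa
  induction fa with
  | zero => intro i; rfl
  | succ fa ih =>
    intro i
    simp only [pvA_loop]
    by_cases hcond : (i : Int) ≤ (s.length : Int) - (sub.length : Int)
    · rw [if_pos hcond]
      by_cases hmatch : PySem.List.slice s (some (i : Int))
          (some ((i : Int) + (sub.length : Int))) = sub
      · rw [if_pos hmatch]
        have := hno i ((pv_match_iff sub s i).1 hmatch)
        rw [if_neg (by omega)]
        exact ih (i + sub.length)
      · rw [if_neg hmatch]
        exact ih (i + 1)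
    · rw [if_neg hcond]

-- once A's mutated flag is set it never clears
lemma pvA_true (sub : List Char) (pos : Int) :
    ∀ (fa : Nat) (s : List Char) (i : Nat), (pvA_loop sub pos fa s i true).2 = true := by
  intro fa
  induction fa with
  | zero => intro s i; rfl
  | succ fa ih =>
    intro s i
    simp only [pvA_loop]
    split_ifs <;> first | rfl | exact ih _ _

-- a reachable first occurrence sets A's mutated flag
lemma pvA_flag (s sub : List Char) (hsub : sub ≠ []) (pos : Int) (j0 : Nat)
    (hocc : sub <+: s.drop j0) (hmin : ∀ j < j0, ¬ sub <+: s.drop j)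
    (ht : (j0 : Int) + pos < (s.length : Int)) :
    ∀ (fa : Nat) (i : Nat), i ≤ j0 → j0 + 2 ≤ fa + i →
      (pvA_loop sub pos fa s i false).2 = true := by
  have hlen : j0 + sub.length ≤ s.length := by
    have := hocc.length_le
    simp only [List.length_drop] at this
    have hm : 0 < sub.length := List.length_pos_of_ne_nil hsub
    omega
  intro fa
  induction fa with
  | zero => intro i hi hfa; omega
  | succ fa ih =>
    intro i hi hfa
    simp only [pvA_loop]
    rw [if_pos (by push_cast; omega)]
    rcases Nat.lt_or_ge i j0 with hlt | hge
    · rw [if_neg (fun hc => hmin i hlt ((pv_match_iff sub s i).1 hc))]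
      exact ih (i + 1) (by omega) (by omega)
    · have hij : i = j0 := by omega
      subst hij
      rw [if_pos ((pv_match_iff sub s i).2 hocc), if_pos (by exact_mod_cast ht)]
      exact pvA_true sub pos fa _ _

-- a fold that appends nothing is its initial accumulator
lemma pv_foldl_const {α β : Type} (f : List β → α → List β) (l : List α)
    (h : ∀ acc x, f acc x = acc) : ∀ acc, l.foldl f acc = acc := by
  induction l with
  | nil => intro acc; rfl
  | cons x xs ih => intro acc; rw [List.foldl_cons, h]; exact ih acc

-- a fold whose steps never shrink the accumulator …
lemma pv_foldl_len_mono {α β : Type} (f : List β → α → List β)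
    (hstep : ∀ a x, a.length ≤ (f a x).length) :
    ∀ (l : List α) (acc : List β), acc.length ≤ (l.foldl f acc).length := by
  intro l
  induction l with
  | nil => intro acc; exact le_refl _
  | cons y ys ih => intro acc; exact (hstep acc y).trans (ih (f acc y))

-- … grows strictly past an element whose step strictly grows it
lemma pv_foldl_len_grow {α β : Type} (f : List β → α → List β)
    (hstep : ∀ a x, a.length ≤ (f a x).length) (x : α)
    (hgrow : ∀ a, a.length < (f a x).length) :
    ∀ (l : List α) (acc : List β), x ∈ l → acc.length < (l.foldl f acc).length := by
  intro l
  induction l with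
  | nil => intro acc h; simp at h
  | cons y ys ih =>
    intro acc hx
    rcases List.mem_cons.1 hx with rfl | hx'
    · exact lt_of_lt_of_le (hgrow acc) (pv_foldl_len_mono f hstep ys (f acc x))
    · exact lt_of_le_of_lt (hstep acc y) (ih (f acc y) hx')

-- ===== VERDICT (by name: the statement is the Claim_ definition above) =====
theorem find_and_mutate_spec : Claim_unchanged_find_and_mutate := by
  intro sequences subseq pos hdom hpre hnD
  show find_and_mutate sequences subseq pos = find_and_mutate_alt sequences subseq pos
  unfold find_and_mutate find_and_mutate_alt
  by_cases hwin : 0 ≤ pos ∧ pos < (subseq.toList.length : Int)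
  · -- in-window: the overlay loop equivalence, sequence by sequence
    simp only [decide_eq_true hwin]
    apply PySem.List.foldl_congr_mem
    intro acc p hp
    have key := pv_loop_eq_win p.2.toList subseq.toList hpre pos hwin.1 hwin.2
      (2 * (p.2.toList.length + pos.natAbs) + 8) PySem.Set.empty 0 false
      (p.2.toList.length + 2) (Nat.zero_le _)
      (by intro q hq; simp [PySem.Set.empty] at hq)
      (by simp [PySem.Set.empty]) (by omega) (by omega)
    rw [pvOv_empty] at key
    beta_reduce
    rw [key]
    simp only [decide_eq_true_eq]
    by_cases hne : pvB_loop p.2.toList subseq.toList pos true (p.2.toList.length + 2)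
        PySem.Set.empty 0 ≠ []
    · rw [if_pos hne, if_pos hne]
      rfl
    · rw [if_neg hne, if_neg hne]
  · -- out of window, outside D_: A never reaches a mutation index below the length; both fold to nothing
    have hd : decide (0 ≤ pos ∧ pos < (subseq.toList.length : Int)) = false :=
      decide_eq_false hwin
    simp only [hd]
    apply PySem.List.foldl_congr_mem
    intro acc p hp
    have hmem : p.2 ∈ sequences := by
      rcases (PySem.List.mem_enumerate_iff ..).1 hp with ⟨k, hk, hpk⟩
      rw [hpk]
      exact List.getElem_mem hk
    have hno : ∀ j : Nat, subseq.toList <+: p.2.toList.drop j →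
        (p.2.toList.length : Int) ≤ (j : Int) + pos := by
      intro j hocc
      by_contra hlt
      apply hnD
      refine ⟨by omega, p.2, hmem, ?_⟩
      apply pv_match_in_prefix p.2.toList subseq.toList j _ ?_ hocc
      have hjm := hocc.length_le
      simp only [List.length_drop] at hjm
      have hm : 0 < subseq.toList.length := List.length_pos_of_ne_nil hpre
      omega
    beta_reduce
    rw [pvA_noop p.2.toList subseq.toList pos hno _ 0, pvB_noop]
    simp [PySem.Set.empty]

theorem find_and_mutate_changed : Claim_changed_find_and_mutate := by
  unfold Claim_changed_find_and_mutate; decide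

theorem find_and_mutate_tight : Claim_exact_find_and_mutate := by
  intro sequences subseq pos hdom hpre hD heq
  obtain ⟨hrange, s0, hmem, hocc⟩ := hD
  have hm : 0 < subseq.toList.length := List.length_pos_of_ne_nil hpre
  have hwin : ¬ (0 ≤ pos ∧ pos < (subseq.toList.length : Int)) := by
    rcases hrange with h | h <;> omega
  -- B returns nothing at all
  have hB : find_and_mutate_alt sequences subseq pos = [] := by
    unfold find_and_mutate_alt
    simp only [decide_eq_false hwin]
    refine pv_foldl_const _ _ ?_ []
    intro acc p
    beta_reduce
    rw [pvB_noop]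
    simp [PySem.Set.empty]
  -- A reports s0 as mutated, so its result list is nonempty
  have hA : find_and_mutate sequences subseq pos ≠ [] := by
    -- the first occurrence of subseq in s0 and its reachable mutation target
    obtain ⟨j, hj⟩ := (pv_infix_iff_exists subseq.toList s0.toList).1
      (hocc.trans (List.take_prefix _ _).isInfix)
    have hex : ∃ j, subseq.toList <+: s0.toList.drop j := ⟨j, hj⟩
    let j0 := Nat.find hex
    have hocc0 : subseq.toList <+: s0.toList.drop j0 := Nat.find_spec hex
    have hmin : ∀ j' < j0, ¬ subseq.toList <+: s0.toList.drop j' := by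
      intro j' hj'
      exact Nat.find_min hex hj'
    -- the occurrence from D_ lies inside the reachable prefix, so j0 + pos < length
    have hjle : ∃ jr, subseq.toList <+: s0.toList.drop jr ∧
        (jr : Int) + pos < (s0.toList.length : Int) := by
      obtain ⟨jr, hjr⟩ := (pv_infix_iff_exists subseq.toList
        (s0.toList.take (s0.toList.length + subseq.toList.length - 1 - pos.toNat))).1 hocc
      rw [List.drop_take] at hjr
      have hjr' : subseq.toList <+: s0.toList.drop jr :=
        hjr.trans (List.take_prefix _ _)
      have hlenr := hjr.length_le
      simp only [List.length_take, List.length_drop] at hlenr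
      refine ⟨jr, hjr', ?_⟩
      rcases hrange with h | h
      · have := hjr'.length_le
        simp only [List.length_drop] at this
        have hm' : 0 < subseq.toList.length := hm
        omega
      · omega
    obtain ⟨jr, hjrocc, hjrt⟩ := hjle
    have ht0 : (j0 : Int) + pos < (s0.toList.length : Int) := by
      have : j0 ≤ jr := Nat.find_min' hex hjrocc
      rcases hrange with h | h <;> omega
    -- the flag is set for s0's slot, so the fold strictly grows there
    obtain ⟨k, hk, hks⟩ := List.getElem_of_mem hmem
    have hflag : (pvA_loop subseq.toList pos
        (2 * (s0.toList.length + pos.natAbs) + 8) s0.toList 0 false).2 = true := by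
      apply pvA_flag s0.toList subseq.toList hpre pos j0 hocc0 hmin ht0 _ 0 (Nat.zero_le _)
      have hj0 : j0 ≤ s0.toList.length := by
        have := hocc0.length_le
        simp only [List.length_drop] at this
        omega
      omega
    have hmemE : ((k : Int), s0) ∈ PySem.List.enumerate sequences 0 := by
      rw [PySem.List.mem_enumerate_iff]
      exact ⟨k, hk, by rw [hks]; simp⟩
    unfold find_and_mutate
    intro hcon
    have hgrow := pv_foldl_len_grow
      (f := fun acc p =>
        let r := pvA_loop subseq.toList pos
          (2 * (p.2.toList.length + pos.natAbs) + 8) p.2.toList 0 false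
        if r.2 = true then acc ++ [(p.1, String.ofList r.1)] else acc)
      (by
        intro a x
        dsimp only
        split_ifs
        · simp
        · exact le_refl _)
      ((k : Int), s0)
      (by
        intro a
        dsimp only
        rw [if_pos hflag]
        simp)
      (PySem.List.enumerate sequences 0) [] hmemE
    rw [hcon] at hgrow
    simp at hgrow
  exact hA (heq.trans hB)
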